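-- pv_equiv track=rewrite | github.com/hello0U0/codingtest | PROGRAMMERS/최고의집합.py | solution
-- ===== SOURCE A (Python) =====
-- def solution(n, s):
--     answer = []
--     if s//n == 0:
--         return [-1]
--
--     num = s//n
--     cnt = s%n
--     answer = [num for i in range(n-cnt)] + [num + 1 for  i in range(cnt)]
--     return answer
-- ===== SOURCE B (Python) =====
-- def solution(n, s):
--     if s // n == 0:
--         return [-1]
--     answer = []
--     remaining = s
--     for slots in range(n, 0, -1):
--         q = remaining // slots
--         answer.append(q)
--         remaining -= q
--     return answer
-- ===== Notes on version B (the rewrite author's own statement) =====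
-- stated objective: alternative
-- what changed: Replaces the precomputed quotient/remainder and the concatenation of two list comprehensions with a single greedy loop that assigns q = remaining // slots per position while counting the slots down.
import Mathlib
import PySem

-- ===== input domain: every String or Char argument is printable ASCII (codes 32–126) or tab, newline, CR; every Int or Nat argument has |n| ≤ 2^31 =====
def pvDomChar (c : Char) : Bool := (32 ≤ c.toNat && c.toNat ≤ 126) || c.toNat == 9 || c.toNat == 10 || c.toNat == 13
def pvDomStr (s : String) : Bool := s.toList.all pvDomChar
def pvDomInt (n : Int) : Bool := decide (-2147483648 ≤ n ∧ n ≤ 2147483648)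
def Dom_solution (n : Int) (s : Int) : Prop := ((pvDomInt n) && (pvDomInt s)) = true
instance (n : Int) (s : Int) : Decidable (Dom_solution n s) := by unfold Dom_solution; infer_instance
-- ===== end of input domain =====

-- B builds the answer in one greedy countdown loop (q = remaining // slots) instead of
-- precomputing quotient/remainder and concatenating two comprehensions (objective: alternative decomposition).

-- ===== PORT A =====
def solution (n : Int) (s : Int) : List Int :=
  if PySem.Int.floordiv s n == 0 then [-1]
  else
    let num := PySem.Int.floordiv s n
    let cnt := PySem.Int.mod s n
    (PySem.List.pyRange 0 (n - cnt) 1).map (fun _ => num)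
      ++ (PySem.List.pyRange 0 cnt 1).map (fun _ => num + 1)

-- ===== PORT B =====
def solution_alt (n : Int) (s : Int) : List Int :=
  if PySem.Int.floordiv s n == 0 then [-1]
  else
    ((PySem.List.pyRange n 0 (-1)).foldl
      (fun (st : Int × List Int) slots =>
        let q := PySem.Int.floordiv st.1 slots
        (st.1 - q, st.2 ++ [q]))
      (s, [])).2

-- ===== PRECONDITION & SPEC =====
-- Pre_ excludes only n = 0, where Python's s // n raises ZeroDivisionError.
def Pre_solution (n : Int) (s : Int) : Prop := n ≠ 0
instance (n : Int) (s : Int) : Decidable (Pre_solution n s) := by unfold Pre_solution; infer_instance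
def pvWitness_solution : Int × Int := (3, 11)

def Spec_solution (n : Int) (s : Int) (out : List Int) : Prop := out = solution_alt n s
instance (n : Int) (s : Int) (out : List Int) : Decidable (Spec_solution n s out) := by unfold Spec_solution; infer_instance

-- ===== CLAIM (what is proved, stated in full; the proofs are below) =====
def Claim_equal_solution : Prop := ∀ (n : Int) (s : Int), Dom_solution n s → Pre_solution n s → Spec_solution n s (solution n s)

-- ===== LEMMAS AND PROOFS =====

-- floor-division characterisation for a positive divisor
theorem pv_divmod_char (a b q r : Int) (hb : 0 < b) (h : a = q * b + r)
    (h0 : 0 ≤ r) (hr : r < b) :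
    PySem.Int.floordiv a b = q ∧ PySem.Int.mod a b = r := by
  rw [PySem.Int.floordiv_eq_ediv_of_pos hb, PySem.Int.mod_eq_emod_of_pos hb]
  constructor
  · rw [h, show q * b + r = r + q * b by ring, Int.add_mul_ediv_right r q hb.ne',
      Int.ediv_eq_zero_of_lt h0 hr]; ring
  · rw [h, show q * b + r = r + b * q by ring, Int.add_mul_emod_self_left,
      Int.emod_eq_of_lt h0 hr]

-- the greedy countdown fold over range(m, 0, -1) yields the replicate pattern
theorem pv_greedy (k : Nat) : ∀ (s : Int) (acc : List Int),
    ((PySem.List.pyRange ((k : Int) + 1) 0 (-1)).foldl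
      (fun (st : Int × List Int) slots =>
        let q := PySem.Int.floordiv st.1 slots
        (st.1 - q, st.2 ++ [q]))
      (s, acc)).2
    = acc
      ++ List.replicate (((k : Int) + 1) - PySem.Int.mod s ((k : Int) + 1)).toNat (PySem.Int.floordiv s ((k : Int) + 1))
      ++ List.replicate (PySem.Int.mod s ((k : Int) + 1)).toNat (PySem.Int.floordiv s ((k : Int) + 1) + 1) := by
  induction k with
  | zero =>
    intro s acc
    rw [PySem.List.pyRange_neg_one_cons (by norm_num),
        PySem.List.pyRange_neg_one_eq_nil (by norm_num)]
    simp
  | succ k ih =>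
    intro s acc
    have hm : (0 : Int) < (k : Int) + 2 := by positivity
    set m : Int := ((k : Nat) + 1 : Nat) + 1 with hm_def
    have hm2 : m = (k : Int) + 2 := by simp [hm_def]; ring
    set num := PySem.Int.floordiv s m with hnum
    set cnt := PySem.Int.mod s m with hcnt
    have hsum : num * m + cnt = s := PySem.Int.floordiv_mul_add_mod s m
    have hc0 : 0 ≤ cnt := PySem.Int.mod_nonneg s (by omega)
    have hclt : cnt < m := PySem.Int.mod_lt s (by omega)
    rw [PySem.List.pyRange_neg_one_cons (by omega), List.foldl_cons]
    have hstep : (let q := PySem.Int.floordiv (s, acc).1 m;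
        ((s, acc).1 - q, (s, acc).2 ++ [q])) = (s - num, acc ++ [num]) := rfl
    rw [hstep]
    have hm1 : m - 1 = (k : Int) + 1 := by omega
    rw [show m - 1 = (k : Int) + 1 from hm1] at *
    rw [ih (s - num) (acc ++ [num])]
    have hexp : num * m = num * ((k : Int) + 1) + num := by rw [hm2]; ring
    have hexp2 : (num + 1) * ((k : Int) + 1) = num * ((k : Int) + 1) + ((k : Int) + 1) := by ring
    by_cases hcase : cnt < (k : Int) + 1
    · have hchar := pv_divmod_char (s - num) ((k : Int) + 1) num cnt (by omega)
        (by omega) hc0 hcase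
      rw [hchar.1, hchar.2]
      have ht : (m - cnt).toNat = ((k : Int) + 1 - cnt).toNat + 1 := by omega
      rw [ht, List.replicate_succ]
      simp
    · have hceq : cnt = (k : Int) + 1 := by omega
      have hchar := pv_divmod_char (s - num) ((k : Int) + 1) (num + 1) 0 (by omega)
        (by omega) (by omega) (by omega)
      rw [hchar.1, hchar.2]
      have ht : (m - cnt).toNat = 1 := by omega
      have ht2 : ((k : Int) + 1 - 0).toNat = cnt.toNat := by omega
      rw [ht, ht2, hceq]
      simp [List.replicate_succ]

-- both sides at a nonpositive n (lists empty on both sides)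
theorem pv_nonpos (n s : Int) (hn : n < 0) (hg : ¬ PySem.Int.floordiv s n = 0) :
    solution n s = solution_alt n s := by
  unfold solution solution_alt
  rw [if_neg (by simpa using hg), if_neg (by simpa using hg)]
  show ((PySem.List.pyRange 0 (n - PySem.Int.mod s n) 1).map (fun _ => PySem.Int.floordiv s n)
        ++ (PySem.List.pyRange 0 (PySem.Int.mod s n) 1).map (fun _ => PySem.Int.floordiv s n + 1))
      = ((PySem.List.pyRange n 0 (-1)).foldl
          (fun (st : Int × List Int) slots =>
            let q := PySem.Int.floordiv st.1 slots
            (st.1 - q, st.2 ++ [q]))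
          (s, [])).2
  have hcnt : PySem.Int.mod s n ≤ 0 := (PySem.Int.mod_neg_bounds s (by omega)).2
  have hgt : n < PySem.Int.mod s n := (PySem.Int.mod_neg_bounds s (by omega)).1
  rw [PySem.List.pyRange_one_eq_nil (by omega), PySem.List.pyRange_one_eq_nil (by omega),
      PySem.List.pyRange_neg_one_eq_nil (by omega)]
  simp

-- ===== VERDICT (by name: the statement is the Claim_ definition above) =====
theorem solution_spec : Claim_equal_solution := by
  intro n s _ hpre
  unfold Spec_solution
  by_cases hg : PySem.Int.floordiv s n = 0
  · unfold solution solution_alt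
    rw [if_pos (by simpa using hg), if_pos (by simpa using hg)]
  · rcases lt_or_gt_of_ne hpre with hn | hn
    · exact pv_nonpos n s hn hg
    · have hmap : ∀ (t c : Int), (PySem.List.pyRange 0 t 1).map (fun _ => c)
          = List.replicate t.toNat c := by
        intro t c
        rw [List.map_const', PySem.List.length_pyRange_one]
        norm_num
      obtain ⟨k, hk⟩ : ∃ k : Nat, n = (k : Int) + 1 := ⟨(n - 1).toNat, by omega⟩
      subst hk
      unfold solution solution_alt
      rw [if_neg (by simpa using hg), if_neg (by simpa using hg)]
      show ((PySem.List.pyRange 0 (((k : Int) + 1) - PySem.Int.mod s ((k : Int) + 1)) 1).map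
              (fun _ => PySem.Int.floordiv s ((k : Int) + 1))
            ++ (PySem.List.pyRange 0 (PySem.Int.mod s ((k : Int) + 1)) 1).map
              (fun _ => PySem.Int.floordiv s ((k : Int) + 1) + 1))
          = ((PySem.List.pyRange ((k : Int) + 1) 0 (-1)).foldl
              (fun (st : Int × List Int) slots =>
                let q := PySem.Int.floordiv st.1 slots
                (st.1 - q, st.2 ++ [q]))
              (s, [])).2
      rw [pv_greedy k s [], hmap, hmap]
      simp
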